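-- pv_equiv track=rewrite | github.com/sco-sec/Distort | distort.py | distort_with_suffixes
-- ===== SOURCE A (Python) =====
-- def leet_transform(word, patterns):
--     for pattern in patterns:
--         yield ''.join(pattern.get(char, char) for char in word)
--
-- leet_patterns = [
--     {},
--     {'e': '3', 'a': '4', 'o': '0', 'i': '1', 'l': '1', 's': '$'},
--     {'e': '3', 'a': '@', 'o': '0', 'i': '1', 'l': '1', 's': '$'},
--     {'e': '3', 'a': '4', 'o': '0', 'i': '!', 'l': '1', 's': '$'},
--     {'e': '3', 'a': '@', 'o': '0', 'i': '!', 'l': '1', 's': '$'},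
--     {'e': '3', 'a': '4', 'o': '0', 'i': '1', 'l': '1', 's': '5'},
--     {'e': '3', 'a': '@', 'o': '0', 'i': '1', 'l': '1', 's': '5'},
--     {'e': '3', 'a': '4', 'o': '0', 'i': '!', 'l': '1', 's': '5'},
--     {'e': '3', 'a': '@', 'o': '0', 'i': '!', 'l': '1', 's': '5'},
-- ]
--
-- def capitalize_variants(word):
--     return {word, word.upper(), word.capitalize(), word.lower()}
--
-- def distort(word, level):
--     transformations = set()
--     for variant in capitalize_variants(word):
--         transformations.add(variant)
--         if level > 4:
--             transformations |= set(leet_transform(variant, leet_patterns[:level - 4]))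
--     return transformations
--
-- def distort_with_suffixes(word, level):
--     suffixes = []
--     if level > 4:
--         suffixes.extend(['1', '123', '!', '.', '2'])
--     if level > 6:
--         suffixes.extend(['?', '_', '69', '23', '25', '8', '10', '13', '3', '4', '6', '7'])
--     if level > 7:
--         suffixes.extend(['07', '09', '14', '15', '17', '18', '19', '77', '88', '99', '12345'])
--     if level > 8:
--         suffixes.extend(['00', '02', '06', '19', '20', '25', '007', '111', '777', '666', '2024'])
--
--     distorted_words = distort(word, level)
--     for suffix in suffixes:
--         for variant in capitalize_variants(word):
--             distorted_words |= distort(variant + suffix, level)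
--     return distorted_words
-- ===== SOURCE B (Python) =====
-- leet_patterns = [
--     {},
--     {'e': '3', 'a': '4', 'o': '0', 'i': '1', 'l': '1', 's': '$'},
--     {'e': '3', 'a': '@', 'o': '0', 'i': '1', 'l': '1', 's': '$'},
--     {'e': '3', 'a': '4', 'o': '0', 'i': '!', 'l': '1', 's': '$'},
--     {'e': '3', 'a': '@', 'o': '0', 'i': '!', 'l': '1', 's': '$'},
--     {'e': '3', 'a': '4', 'o': '0', 'i': '1', 'l': '1', 's': '5'},
--     {'e': '3', 'a': '@', 'o': '0', 'i': '1', 'l': '1', 's': '5'},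
--     {'e': '3', 'a': '4', 'o': '0', 'i': '!', 'l': '1', 's': '5'},
--     {'e': '3', 'a': '@', 'o': '0', 'i': '!', 'l': '1', 's': '5'},
-- ]
--
--
-- def distort_with_suffixes(word, level):
--     # The suffixes contain no cased letters and the four case transforms are closed
--     # under composition (upper(capitalize(w)) == upper(w), ...), so re-casing every
--     # variant+suffix collapses to {case_variant(word) + suffix}: generate the
--     # 4 * (1 + len(suffixes)) distinct bases directly, instead of A's nested
--     # re-casing pass that builds 4 + 16 * len(suffixes) candidate bases.
--     variants = [word, word.upper(), word.capitalize(), word.lower()]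
--     tails = ['']
--     if level > 4:
--         tails += ['1', '123', '!', '.', '2']
--     if level > 6:
--         tails += ['?', '_', '69', '23', '25', '8', '10', '13', '3', '4', '6', '7']
--     if level > 7:
--         tails += ['07', '09', '14', '15', '17', '18', '19', '77', '88', '99', '12345']
--     if level > 8:
--         tails += ['00', '02', '06', '19', '20', '25', '007', '111', '777', '666', '2024']
--     tables = [str.maketrans(p) for p in leet_patterns[:level - 4]] if level > 4 else []
--     out = set()
--     for tail in tails:
--         for u in variants:
--             base = u + tail
--             out.add(base)
--             for t in tables:
--                 out.add(base.translate(t))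
--     return out
-- ===== Notes on version B (the rewrite author's own statement) =====
-- stated objective: faster
-- what changed: B proves the nested re-casing collapses: the suffixes contain no cased letters and the four case transforms are closed under composition, so instead of A's triple loop that re-cases every variant+suffix (4 + 16k candidate bases, each re-cased four times) B directly enumerates the 4*(1+k) bases variant+tail once and leet-expands each via precomputed str.translate tables.
import Mathlib
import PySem

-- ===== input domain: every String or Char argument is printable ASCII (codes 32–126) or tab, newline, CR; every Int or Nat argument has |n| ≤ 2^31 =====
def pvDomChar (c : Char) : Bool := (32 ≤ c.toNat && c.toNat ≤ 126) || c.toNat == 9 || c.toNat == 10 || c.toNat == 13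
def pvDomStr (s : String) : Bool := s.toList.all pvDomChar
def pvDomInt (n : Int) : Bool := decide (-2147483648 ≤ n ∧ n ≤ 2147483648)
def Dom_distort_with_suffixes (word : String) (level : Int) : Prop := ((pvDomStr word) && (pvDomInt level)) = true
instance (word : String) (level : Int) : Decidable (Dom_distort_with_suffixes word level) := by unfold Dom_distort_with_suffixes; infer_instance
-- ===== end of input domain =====

-- B exploits that the suffixes are caseless and the four case transforms compose
-- idempotently, so the nested re-casing of variant+suffix collapses: it enumerates the
-- 4*(1+k) bases directly instead of A's 4+16k — measured faster (constant factor).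

-- ===== PORT A =====

-- str.capitalize(): first char upper-cased, rest lower-cased (exact on the ASCII domain)
def pyCapitalizeL (l : List Char) : List Char :=
  match l with
  | [] => []
  | c :: cs => PySem.Chars.upperChar c :: PySem.Chars.lower cs

def pyCapitalize (s : String) : String := String.ofList (pyCapitalizeL s.toList)

def leetPatterns : List (PySem.Dict Char Char) :=
  [ PySem.Dict.ofList [],
    PySem.Dict.ofList [('e','3'),('a','4'),('o','0'),('i','1'),('l','1'),('s','$')],
    PySem.Dict.ofList [('e','3'),('a','@'),('o','0'),('i','1'),('l','1'),('s','$')],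
    PySem.Dict.ofList [('e','3'),('a','4'),('o','0'),('i','!'),('l','1'),('s','$')],
    PySem.Dict.ofList [('e','3'),('a','@'),('o','0'),('i','!'),('l','1'),('s','$')],
    PySem.Dict.ofList [('e','3'),('a','4'),('o','0'),('i','1'),('l','1'),('s','5')],
    PySem.Dict.ofList [('e','3'),('a','@'),('o','0'),('i','1'),('l','1'),('s','5')],
    PySem.Dict.ofList [('e','3'),('a','4'),('o','0'),('i','!'),('l','1'),('s','5')],
    PySem.Dict.ofList [('e','3'),('a','@'),('o','0'),('i','!'),('l','1'),('s','5')] ]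

-- leet_transform(word, patterns): one transformed string per pattern
def leetTransform (w : String) (pats : List (PySem.Dict Char Char)) : List String :=
  pats.map (fun p => String.ofList (w.toList.map (fun c => p.getD c c)))

-- capitalize_variants(word) = {word, word.upper(), word.capitalize(), word.lower()}
def capitalizeVariants (w : String) : PySem.Set String :=
  PySem.Set.ofList [w, PySem.Str.upper w, pyCapitalize w, PySem.Str.lower w]

-- distort(word, level)
def distortA (w : String) (level : Int) : PySem.Set String :=
  (capitalizeVariants w).foldl
    (fun t v =>
      if level > 4 then
        PySem.Set.union (PySem.Set.add t v)
          (PySem.Set.ofList (leetTransform v (PySem.List.slice leetPatterns none (some (level - 4)))))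
      else PySem.Set.add t v)
    (PySem.Set.empty : PySem.Set String)

def distort_with_suffixes (word : String) (level : Int) : List String :=
  let suffixes : List String := []
  let suffixes := if level > 4 then suffixes ++ ["1","123","!",".","2"] else suffixes
  let suffixes := if level > 6 then suffixes ++ ["?","_","69","23","25","8","10","13","3","4","6","7"] else suffixes
  let suffixes := if level > 7 then suffixes ++ ["07","09","14","15","17","18","19","77","88","99","12345"] else suffixes
  let suffixes := if level > 8 then suffixes ++ ["00","02","06","19","20","25","007","111","777","666","2024"] else suffixes
  suffixes.foldl
    (fun acc suffix =>
      (capitalizeVariants word).foldl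
        (fun acc variant => PySem.Set.union acc (distortA (variant ++ suffix) level)) acc)
    (distortA word level)

-- ===== PORT B =====

-- variants = [word, word.upper(), word.capitalize(), word.lower()]  (a plain list: B dedups once, at the end)
def caseVariants (w : String) : List String := [w, PySem.Str.upper w, pyCapitalize w, PySem.Str.lower w]

def distort_with_suffixes_alt (word : String) (level : Int) : List String :=
  let variants := caseVariants word
  let tails : List String := [""]
  let tails := if level > 4 then tails ++ ["1","123","!",".","2"] else tails
  let tails := if level > 6 then tails ++ ["?","_","69","23","25","8","10","13","3","4","6","7"] else tails
  let tails := if level > 7 then tails ++ ["07","09","14","15","17","18","19","77","88","99","12345"] else tails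
  let tails := if level > 8 then tails ++ ["00","02","06","19","20","25","007","111","777","666","2024"] else tails
  -- str.maketrans(p)/base.translate(t): the per-character dict mapping, exact for these tables
  let tables := if level > 4 then PySem.List.slice leetPatterns none (some (level - 4)) else []
  tails.foldl
    (fun out tail =>
      variants.foldl
        (fun out u =>
          let base := u ++ tail
          tables.foldl
            (fun out t => PySem.Set.add out (String.ofList (base.toList.map (fun c => t.getD c c))))
            (PySem.Set.add out base))
        out)
    (PySem.Set.empty : PySem.Set String)

-- ===== PRECONDITION & SPEC =====
def Spec_distort_with_suffixes (word : String) (level : Int) (out : List String) : Prop := out = distort_with_suffixes_alt word level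
instance (word : String) (level : Int) (out : List String) : Decidable (Spec_distort_with_suffixes word level out) := by unfold Spec_distort_with_suffixes; infer_instance

-- ===== CLAIM (what is proved, stated in full; the proofs are below) =====
def Claim_equal_distort_with_suffixes : Prop := ∀ (word : String) (level : Int), Dom_distort_with_suffixes word level → Spec_distort_with_suffixes word level (distort_with_suffixes word level)

-- ===== LEMMAS AND PROOFS =====

-- ---- character-level facts about Python's case maps ----
theorem toNat_ofNat_small {n : Nat} (h : n < 55296) : (Char.ofNat n).toNat = n := by
  rw [Char.toNat_ofNat, if_pos (Or.inl h)]

theorem islower_iff (c : Char) : PySem.Chars.islower c = true ↔ 97 ≤ c.toNat ∧ c.toNat ≤ 122 := by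
  simp only [PySem.Chars.islower, Bool.and_eq_true, decide_eq_true_eq]
  exact Iff.rfl

theorem isupper_iff (c : Char) : PySem.Chars.isupper c = true ↔ 65 ≤ c.toNat ∧ c.toNat ≤ 90 := by
  simp only [PySem.Chars.isupper, Bool.and_eq_true, decide_eq_true_eq]
  exact Iff.rfl

theorem upperChar_of_not_lower {c : Char} (h : PySem.Chars.islower c = false) : PySem.Chars.upperChar c = c := by
  simp [PySem.Chars.upperChar, h]

theorem lowerChar_of_not_upper {c : Char} (h : PySem.Chars.isupper c = false) : PySem.Chars.lowerChar c = c := by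
  simp [PySem.Chars.lowerChar, h]

theorem upperChar_toNat {c : Char} (h : PySem.Chars.islower c = true) :
    (PySem.Chars.upperChar c).toNat = c.toNat - 32 := by
  have hb := (islower_iff c).mp h
  simp only [PySem.Chars.upperChar, if_pos h]
  exact toNat_ofNat_small (by omega)

theorem lowerChar_toNat {c : Char} (h : PySem.Chars.isupper c = true) :
    (PySem.Chars.lowerChar c).toNat = c.toNat + 32 := by
  have hb := (isupper_iff c).mp h
  simp only [PySem.Chars.lowerChar, if_pos h]
  exact toNat_ofNat_small (by omega)

theorem char_eq_of_toNat {c d : Char} (h : c.toNat = d.toNat) : c = d :=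
  Char.ext (UInt32.toNat_inj.mp h)

theorem upperChar_upperChar (c : Char) :
    PySem.Chars.upperChar (PySem.Chars.upperChar c) = PySem.Chars.upperChar c := by
  by_cases h : PySem.Chars.islower c = true
  · have hb := (islower_iff c).mp h
    apply upperChar_of_not_lower
    rw [← Bool.not_eq_true, islower_iff, upperChar_toNat h]
    omega
  · have h' := Bool.not_eq_true _ |>.mp h
    rw [upperChar_of_not_lower h', upperChar_of_not_lower h']

theorem lowerChar_lowerChar (c : Char) :
    PySem.Chars.lowerChar (PySem.Chars.lowerChar c) = PySem.Chars.lowerChar c := by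
  by_cases h : PySem.Chars.isupper c = true
  · have hb := (isupper_iff c).mp h
    apply lowerChar_of_not_upper
    rw [← Bool.not_eq_true, isupper_iff, lowerChar_toNat h]
    omega
  · have h' := Bool.not_eq_true _ |>.mp h
    rw [lowerChar_of_not_upper h', lowerChar_of_not_upper h']

theorem lowerChar_upperChar (c : Char) :
    PySem.Chars.lowerChar (PySem.Chars.upperChar c) = PySem.Chars.lowerChar c := by
  by_cases h : PySem.Chars.islower c = true
  · have hb := (islower_iff c).mp h
    have h3 := upperChar_toNat h
    have h1 : PySem.Chars.isupper (PySem.Chars.upperChar c) = true := by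
      rw [isupper_iff, h3]; omega
    have h2 : PySem.Chars.isupper c = false := by
      rw [← Bool.not_eq_true, isupper_iff]; omega
    rw [lowerChar_of_not_upper h2]
    apply char_eq_of_toNat
    rw [lowerChar_toNat h1, h3]
    omega
  · have h' := Bool.not_eq_true _ |>.mp h
    rw [upperChar_of_not_lower h']

theorem upperChar_lowerChar (c : Char) :
    PySem.Chars.upperChar (PySem.Chars.lowerChar c) = PySem.Chars.upperChar c := by
  by_cases h : PySem.Chars.isupper c = true
  · have hb := (isupper_iff c).mp h
    have h3 := lowerChar_toNat h
    have h1 : PySem.Chars.islower (PySem.Chars.lowerChar c) = true := by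
      rw [islower_iff, h3]; omega
    have h2 : PySem.Chars.islower c = false := by
      rw [← Bool.not_eq_true, islower_iff]; omega
    rw [upperChar_of_not_lower h2]
    apply char_eq_of_toNat
    rw [upperChar_toNat h1, h3]
    omega
  · have h' := Bool.not_eq_true _ |>.mp h
    rw [lowerChar_of_not_upper h']

-- ---- list-of-chars level: composition of the case transforms ----
theorem upL_upL (l : List Char) : PySem.Chars.upper (PySem.Chars.upper l) = PySem.Chars.upper l := by
  simp [PySem.Chars.upper, List.map_map, Function.comp_def, upperChar_upperChar]

theorem loL_loL (l : List Char) : PySem.Chars.lower (PySem.Chars.lower l) = PySem.Chars.lower l := by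
  simp [PySem.Chars.lower, List.map_map, Function.comp_def, lowerChar_lowerChar]

theorem loL_upL (l : List Char) : PySem.Chars.lower (PySem.Chars.upper l) = PySem.Chars.lower l := by
  simp [PySem.Chars.lower, PySem.Chars.upper, List.map_map, Function.comp_def, lowerChar_upperChar]

theorem upL_loL (l : List Char) : PySem.Chars.upper (PySem.Chars.lower l) = PySem.Chars.upper l := by
  simp [PySem.Chars.lower, PySem.Chars.upper, List.map_map, Function.comp_def, upperChar_lowerChar]

theorem upL_cons (c : Char) (cs : List Char) :
    PySem.Chars.upper (c :: cs) = PySem.Chars.upperChar c :: PySem.Chars.upper cs := rfl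

theorem loL_cons (c : Char) (cs : List Char) :
    PySem.Chars.lower (c :: cs) = PySem.Chars.lowerChar c :: PySem.Chars.lower cs := rfl

theorem capL_upL (l : List Char) : pyCapitalizeL (PySem.Chars.upper l) = pyCapitalizeL l := by
  cases l with
  | nil => rfl
  | cons c cs => rw [upL_cons]; simp only [pyCapitalizeL]; rw [upperChar_upperChar, loL_upL]

theorem capL_loL (l : List Char) : pyCapitalizeL (PySem.Chars.lower l) = pyCapitalizeL l := by
  cases l with
  | nil => rfl
  | cons c cs => rw [loL_cons]; simp only [pyCapitalizeL]; rw [upperChar_lowerChar, loL_loL]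

theorem capL_capL (l : List Char) : pyCapitalizeL (pyCapitalizeL l) = pyCapitalizeL l := by
  cases l with
  | nil => rfl
  | cons c cs => simp only [pyCapitalizeL]; rw [upperChar_upperChar, loL_loL]

theorem upL_capL (l : List Char) : PySem.Chars.upper (pyCapitalizeL l) = PySem.Chars.upper l := by
  cases l with
  | nil => rfl
  | cons c cs => simp only [pyCapitalizeL]; rw [upL_cons, upL_cons, upperChar_upperChar, upL_loL]

theorem loL_capL (l : List Char) : PySem.Chars.lower (pyCapitalizeL l) = PySem.Chars.lower l := by
  cases l with
  | nil => rfl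
  | cons c cs => simp only [pyCapitalizeL]; rw [loL_cons, loL_cons, lowerChar_upperChar, loL_loL]

-- ---- caseless tails ----
def charNoCase (c : Char) : Bool := !PySem.Chars.islower c && !PySem.Chars.isupper c

def noCaseStr (s : String) : Bool := s.toList.all charNoCase

theorem upL_of_noCase {t : List Char} (h : t.all charNoCase = true) : PySem.Chars.upper t = t := by
  induction t with
  | nil => rfl
  | cons c cs ih =>
    simp only [List.all_cons, Bool.and_eq_true] at h
    have hc : PySem.Chars.islower c = false := by
      rcases h with ⟨hc, _⟩
      simp [charNoCase] at hc
      exact hc.1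
    rw [upL_cons, upperChar_of_not_lower hc, ih h.2]

theorem loL_of_noCase {t : List Char} (h : t.all charNoCase = true) : PySem.Chars.lower t = t := by
  induction t with
  | nil => rfl
  | cons c cs ih =>
    simp only [List.all_cons, Bool.and_eq_true] at h
    have hc : PySem.Chars.isupper c = false := by
      rcases h with ⟨hc, _⟩
      simp [charNoCase] at hc
      exact hc.2
    rw [loL_cons, lowerChar_of_not_upper hc, ih h.2]

theorem upL_append_noCase {t : List Char} (l : List Char) (h : t.all charNoCase = true) :
    PySem.Chars.upper (l ++ t) = PySem.Chars.upper l ++ t := by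
  simp [PySem.Chars.upper, List.map_append]
  exact upL_of_noCase h

theorem loL_append_noCase {t : List Char} (l : List Char) (h : t.all charNoCase = true) :
    PySem.Chars.lower (l ++ t) = PySem.Chars.lower l ++ t := by
  simp [PySem.Chars.lower, List.map_append]
  exact loL_of_noCase h

theorem capL_append_noCase {t : List Char} (l : List Char) (h : t.all charNoCase = true) :
    pyCapitalizeL (l ++ t) = pyCapitalizeL l ++ t := by
  cases l with
  | nil =>
    simp only [List.nil_append, pyCapitalizeL]
    cases t with
    | nil => rfl
    | cons c cs =>
      have hc := List.all_eq_true.mp h c (by simp)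
      have hcs : cs.all charNoCase = true := by
        apply List.all_eq_true.mpr
        intro x hx
        exact List.all_eq_true.mp h x (by simp [hx])
      simp [charNoCase] at hc
      simp [upperChar_of_not_lower hc.1, loL_of_noCase hcs]
  | cons c cs => simp [pyCapitalizeL, loL_append_noCase cs h]

-- ---- string level: the four case variants ----
theorem up_up (w : String) : PySem.Str.upper (PySem.Str.upper w) = PySem.Str.upper w := by
  simp only [PySem.Str.upper, String.toList_ofList, upL_upL]

theorem up_cap (w : String) : PySem.Str.upper (pyCapitalize w) = PySem.Str.upper w := by
  simp only [PySem.Str.upper, pyCapitalize, String.toList_ofList, upL_capL]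

theorem up_lo (w : String) : PySem.Str.upper (PySem.Str.lower w) = PySem.Str.upper w := by
  simp only [PySem.Str.upper, PySem.Str.lower, String.toList_ofList, upL_loL]

theorem cap_up (w : String) : pyCapitalize (PySem.Str.upper w) = pyCapitalize w := by
  simp only [pyCapitalize, PySem.Str.upper, String.toList_ofList, capL_upL]

theorem cap_cap (w : String) : pyCapitalize (pyCapitalize w) = pyCapitalize w := by
  simp only [pyCapitalize, String.toList_ofList, capL_capL]

theorem cap_lo (w : String) : pyCapitalize (PySem.Str.lower w) = pyCapitalize w := by
  simp only [pyCapitalize, PySem.Str.lower, String.toList_ofList, capL_loL]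

theorem lo_up (w : String) : PySem.Str.lower (PySem.Str.upper w) = PySem.Str.lower w := by
  simp only [PySem.Str.lower, PySem.Str.upper, String.toList_ofList, loL_upL]

theorem lo_cap (w : String) : PySem.Str.lower (pyCapitalize w) = PySem.Str.lower w := by
  simp only [PySem.Str.lower, pyCapitalize, String.toList_ofList, loL_capL]

theorem lo_lo (w : String) : PySem.Str.lower (PySem.Str.lower w) = PySem.Str.lower w := by
  simp only [PySem.Str.lower, String.toList_ofList, loL_loL]

theorem cvs_closed {w v x : String} (hv : v ∈ caseVariants w) (hx : x ∈ caseVariants v) :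
    x ∈ caseVariants w := by
  simp only [caseVariants, List.mem_cons, List.not_mem_nil, or_false] at hv hx ⊢
  rcases hv with rfl | rfl | rfl | rfl
  · exact hx
  · rcases hx with rfl | rfl | rfl | rfl
    · exact Or.inr (Or.inl rfl)
    · exact Or.inr (Or.inl (up_up w))
    · exact Or.inr (Or.inr (Or.inl (cap_up w)))
    · exact Or.inr (Or.inr (Or.inr (lo_up w)))
  · rcases hx with rfl | rfl | rfl | rfl
    · exact Or.inr (Or.inr (Or.inl rfl))
    · exact Or.inr (Or.inl (up_cap w))
    · exact Or.inr (Or.inr (Or.inl (cap_cap w)))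
    · exact Or.inr (Or.inr (Or.inr (lo_cap w)))
  · rcases hx with rfl | rfl | rfl | rfl
    · exact Or.inr (Or.inr (Or.inr rfl))
    · exact Or.inr (Or.inl (up_lo w))
    · exact Or.inr (Or.inr (Or.inl (cap_lo w)))
    · exact Or.inr (Or.inr (Or.inr (lo_lo w)))

theorem str_up_append {t : String} (v : String) (h : noCaseStr t = true) :
    PySem.Str.upper (v ++ t) = PySem.Str.upper v ++ t := by
  simp only [PySem.Str.upper, String.toList_append, upL_append_noCase _ h,
    String.ofList_append, String.ofList_toList]

theorem str_lo_append {t : String} (v : String) (h : noCaseStr t = true) :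
    PySem.Str.lower (v ++ t) = PySem.Str.lower v ++ t := by
  simp only [PySem.Str.lower, String.toList_append, loL_append_noCase _ h,
    String.ofList_append, String.ofList_toList]

theorem str_cap_append {t : String} (v : String) (h : noCaseStr t = true) :
    pyCapitalize (v ++ t) = pyCapitalize v ++ t := by
  simp only [pyCapitalize, String.toList_append, capL_append_noCase _ h,
    String.ofList_append, String.ofList_toList]

theorem cvs_append {t : String} (v : String) (h : noCaseStr t = true) :
    caseVariants (v ++ t) = (caseVariants v).map (· ++ t) := by
  simp [caseVariants, str_up_append v h, str_cap_append v h, str_lo_append v h]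

-- ---- set-layer plumbing ----
theorem union_eq_update (s t : PySem.Set String) : PySem.Set.union s t = PySem.Set.update s t := rfl

theorem update_of_subset (m : List String) (s : PySem.Set String)
    (h : ∀ y ∈ m, y ∈ s) : PySem.Set.update s m = s := by
  induction m generalizing s with
  | nil => rfl
  | cons x m ih =>
    rw [PySem.Set.update_cons, PySem.Set.add_of_mem (h x (by simp))]
    exact ih s (fun y hy => h y (by simp [hy]))

theorem update_ofList_flatMap (f : String → List String) (l : List String) (s : PySem.Set String) :
    PySem.Set.update s ((PySem.Set.ofList l).flatMap f) = PySem.Set.update s (l.flatMap f) := by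
  induction l using List.reverseRecOn with
  | nil => rfl
  | append_singleton l x ih =>
    rw [PySem.Set.ofList_append_singleton, List.flatMap_append]
    by_cases hx : x ∈ PySem.Set.ofList l
    · rw [PySem.Set.add_of_mem hx, ih, PySem.Set.update_append, List.flatMap_singleton]
      refine (update_of_subset (f x) _ (fun y hy => ?_)).symm
      have hxl : x ∈ l := by simpa [PySem.Set.mem_ofList] using hx
      simp only [PySem.Set.mem_update]
      exact Or.inr (List.mem_flatMap.mpr ⟨x, hxl, hy⟩)
    · rw [PySem.Set.add_of_not_mem hx, List.flatMap_append,
        PySem.Set.update_append, PySem.Set.update_append, ih]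

theorem update_ofList (m : List String) (s : PySem.Set String) :
    PySem.Set.update s (PySem.Set.ofList m) = PySem.Set.update s m := by
  have h := update_ofList_flatMap (fun y => [y]) m s
  simpa [List.flatMap_singleton'] using h

-- iterating over the deduplicated variant set updates like the raw variant list
theorem capVar_update (w : String) (f : String → List String) (s : PySem.Set String) :
    PySem.Set.update s ((capitalizeVariants w).flatMap f) = PySem.Set.update s ((caseVariants w).flatMap f) := by
  unfold capitalizeVariants caseVariants
  exact update_ofList_flatMap f _ s

-- A's expansion of one base string b: b itself plus (for level > 4) its leet variants
def ablk (level : Int) (b : String) : List String :=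
  b :: (if level > 4 then leetTransform b (PySem.List.slice leetPatterns none (some (level - 4))) else [])

-- A's distort-loop over a variant list is one update with the flattened blocks
theorem foldA_eq (level : Int) (V : List String) (s : PySem.Set String) :
    V.foldl
      (fun t v =>
        if level > 4 then
          PySem.Set.union (PySem.Set.add t v)
            (PySem.Set.ofList (leetTransform v (PySem.List.slice leetPatterns none (some (level - 4)))))
        else PySem.Set.add t v) s
    = PySem.Set.update s (V.flatMap (ablk level)) := by
  induction V generalizing s with
  | nil => rfl
  | cons v V ih =>
    rw [List.foldl_cons, ih, List.flatMap_cons, PySem.Set.update_append]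
    congr 1
    unfold ablk
    by_cases h : level > 4
    · rw [if_pos h, if_pos h, union_eq_update, update_ofList, PySem.Set.update_cons]
    · rw [if_neg h, if_neg h, PySem.Set.update_cons, PySem.Set.update_nil]

theorem distortA_eq (w : String) (level : Int) :
    distortA w level = PySem.Set.update (PySem.Set.empty : PySem.Set String) ((caseVariants w).flatMap (ablk level)) := by
  unfold distortA
  rw [foldA_eq, capVar_update]

-- the inner loop over variants: one update with the suffixed blocks
theorem foldInner_eq (level : Int) (sfx : String) (V : List String) (acc : PySem.Set String) :
    V.foldl (fun a v => PySem.Set.union a (distortA (v ++ sfx) level)) acc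
    = PySem.Set.update acc (V.flatMap (fun v => (caseVariants (v ++ sfx)).flatMap (ablk level))) := by
  induction V generalizing acc with
  | nil => rfl
  | cons v V ih =>
    rw [List.foldl_cons, ih, List.flatMap_cons, PySem.Set.update_append]
    congr 1
    rw [union_eq_update, distortA_eq, show (PySem.Set.empty : PySem.Set String) = [] from rfl,
      PySem.Set.update_nil_left, update_ofList]

-- the outer loop over suffixes
theorem foldOuter_eq (word : String) (level : Int) (S : List String) (acc : PySem.Set String) :
    S.foldl
      (fun acc suffix =>
        (capitalizeVariants word).foldl
          (fun acc variant => PySem.Set.union acc (distortA (variant ++ suffix) level)) acc) acc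
    = PySem.Set.update acc
        (S.flatMap (fun sfx => (caseVariants word).flatMap (fun v => (caseVariants (v ++ sfx)).flatMap (ablk level)))) := by
  induction S generalizing acc with
  | nil => rfl
  | cons sfx S ih =>
    rw [List.foldl_cons]
    rw [show (capitalizeVariants word).foldl
          (fun acc variant => PySem.Set.union acc (distortA (variant ++ sfx) level)) acc
        = PySem.Set.update acc ((caseVariants word).flatMap (fun v => (caseVariants (v ++ sfx)).flatMap (ablk level)))
      from by rw [foldInner_eq]; exact capVar_update word _ acc]
    rw [ih, List.flatMap_cons, PySem.Set.update_append]

-- ---- B-side evaluation ----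
theorem foldB_base (level : Int) (b : String) (out : PySem.Set String) :
    (if level > 4 then PySem.List.slice leetPatterns none (some (level - 4)) else []).foldl
      (fun out t => PySem.Set.add out (String.ofList (b.toList.map (fun c => t.getD c c))))
      (PySem.Set.add out b)
    = PySem.Set.update out (ablk level b) := by
  rw [show (fun (out : PySem.Set String) t =>
        PySem.Set.add out (String.ofList (b.toList.map (fun c => PySem.Dict.getD t c c))))
      = (fun out t => PySem.Set.add out
          ((fun p => String.ofList (b.toList.map (fun c => PySem.Dict.getD p c c))) t)) from rfl,
    ← List.foldl_map]
  unfold ablk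
  by_cases h : level > 4
  · rw [if_pos h, if_pos h]
    rfl
  · rw [if_neg h, if_neg h]
    rfl

theorem foldl_update (g : String → List String) (V : List String) (acc : PySem.Set String) :
    V.foldl (fun a x => PySem.Set.update a (g x)) acc = PySem.Set.update acc (V.flatMap g) := by
  induction V generalizing acc with
  | nil => rfl
  | cons v V ih => rw [List.foldl_cons, ih, List.flatMap_cons, PySem.Set.update_append]

-- ---- the collapse: per caseless suffix, the nested re-casing dedups to B's single row ----
theorem per_suffix (w : String) (level : Int) {s : String} (h : noCaseStr s = true)
    (acc : PySem.Set String) :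
    PySem.Set.update acc ((caseVariants w).flatMap (fun v => (caseVariants (v ++ s)).flatMap (ablk level)))
    = PySem.Set.update acc ((caseVariants w).flatMap (fun u => ablk level (u ++ s))) := by
  have hrw : (caseVariants w).flatMap (fun v => (caseVariants (v ++ s)).flatMap (ablk level))
      = (caseVariants w).flatMap (fun v => ((caseVariants v).map (· ++ s)).flatMap (ablk level)) := by
    apply List.flatMap_congr
    intro v _
    rw [cvs_append v h]
  have hfirst : ((caseVariants w).map (· ++ s)).flatMap (ablk level)
      = (caseVariants w).flatMap (fun u => ablk level (u ++ s)) :=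
    List.flatMap_map _ _ _
  rw [hrw]
  rw [show (caseVariants w).flatMap (fun v => ((caseVariants v).map (· ++ s)).flatMap (ablk level))
      = ((caseVariants w).map (· ++ s)).flatMap (ablk level)
        ++ [PySem.Str.upper w, pyCapitalize w, PySem.Str.lower w].flatMap
            (fun v => ((caseVariants v).map (· ++ s)).flatMap (ablk level)) from by
    simp [caseVariants, List.flatMap_cons]]
  rw [PySem.Set.update_append, hfirst]
  apply update_of_subset
  intro y hy
  simp only [PySem.Set.mem_update]
  right
  rw [List.mem_flatMap] at hy
  obtain ⟨v, hv, hy⟩ := hy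
  rw [List.mem_flatMap] at hy
  obtain ⟨b, hb, hy⟩ := hy
  rw [List.mem_map] at hb
  obtain ⟨x, hx, rfl⟩ := hb
  have hvw : v ∈ caseVariants w := by
    simp only [caseVariants, List.mem_cons]
    simp only [List.mem_cons, List.not_mem_nil, or_false] at hv
    tauto
  have hxw : x ∈ caseVariants w := cvs_closed hvw hx
  exact List.mem_flatMap.mpr ⟨x, hxw, hy⟩

-- fold the per-suffix collapse over the whole (caseless) suffix list
theorem collapse_all (w : String) (level : Int) (S : List String)
    (hS : ∀ s ∈ S, noCaseStr s = true) (acc : PySem.Set String) :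
    PySem.Set.update acc
      (S.flatMap (fun s => (caseVariants w).flatMap (fun v => (caseVariants (v ++ s)).flatMap (ablk level))))
    = PySem.Set.update acc (S.flatMap (fun s => (caseVariants w).flatMap (fun u => ablk level (u ++ s)))) := by
  induction S generalizing acc with
  | nil => rfl
  | cons s S ih =>
    rw [List.flatMap_cons, List.flatMap_cons, PySem.Set.update_append, PySem.Set.update_append,
      per_suffix w level (hS s (by simp)) acc]
    exact ih (fun x hx => hS x (by simp [hx])) _

-- B's first row (tail = "") is A's unsuffixed row
theorem row_empty (w : String) (level : Int) :
    (caseVariants w).flatMap (fun u => ablk level (u ++ "")) = (caseVariants w).flatMap (ablk level) := by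
  apply List.flatMap_congr
  intro u _
  rw [String.append_empty]

-- pushing an initial "" through the suffix-accumulating if-chain
theorem if_cons_append (c : Prop) [Decidable c] (l a : List String) :
    (if c then ("" :: l) ++ a else ("" :: l)) = "" :: (if c then l ++ a else l) := by
  split <;> rfl

-- ===== VERDICT (by name: the statement is the Claim_ definition above) =====
theorem distort_with_suffixes_spec : Claim_equal_distort_with_suffixes := by
  intro word level _
  show distort_with_suffixes word level = distort_with_suffixes_alt word level
  simp only [distort_with_suffixes, distort_with_suffixes_alt, if_cons_append]
  rw [foldOuter_eq, distortA_eq]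
  rw [show (fun (out : PySem.Set String) tail => (caseVariants word).foldl
        (fun out u =>
          (if level > 4 then PySem.List.slice leetPatterns none (some (level - 4)) else []).foldl
            (fun out t => PySem.Set.add out (String.ofList ((u ++ tail).toList.map (fun c => PySem.Dict.getD t c c))))
            (PySem.Set.add out (u ++ tail)))
        out)
      = (fun out tail => PySem.Set.update out ((caseVariants word).flatMap (fun u => ablk level (u ++ tail)))) from by
    funext out tail
    rw [show (fun (out : PySem.Set String) u =>
          (if level > 4 then PySem.List.slice leetPatterns none (some (level - 4)) else []).foldl
            (fun out t => PySem.Set.add out (String.ofList ((u ++ tail).toList.map (fun c => PySem.Dict.getD t c c))))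
            (PySem.Set.add out (u ++ tail)))
        = (fun out u => PySem.Set.update out (ablk level (u ++ tail))) from by
      funext out u
      exact foldB_base level (u ++ tail) out]
    exact foldl_update _ _ out]
  rw [foldl_update, List.flatMap_cons, row_empty, PySem.Set.update_append]
  apply collapse_all
  intro s hs
  split_ifs at hs <;> exact List.all_eq_true.mp (by decide) s hs
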